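-- pv_equiv track=rewrite | github.com/DiegoNavaArsola/practica_4_vision | practica_filtros/filtros_funciones.py | first_derivate
-- ===== SOURCE A (Python) =====
-- def pascal_triangle(n):
--     """
--     :param n: Nivel del triángulo
--     :return: Lista con los coeficientes presentes en el nivel n del triángulo de pascal
--     """
--
--     triangle = []
--     if n <= 0:
--         return [1]
--     else:
--         for i in range(n):
--                 row = [None for element in range(i + 1)]
--                 row[0], row[-1] = 1, 1
--                 for j in range(1, i):
--                     row[j] = triangle[i-1][j-1] + triangle[i-1][j]
--                 triangle.append(row)
--         return triangle[-1]
--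
-- def first_derivate(n):
--     """
--     :param n: Nivel del triángulo
--     :return: Lista los coeficientes presentes en el triángulo derivado de pascal en el nivel n
--     """
--
--     inv_triangle = []
--     if n > 0:
--         row_pascal = pascal_triangle(n)
--
--         inverse_row_pascal = [-1 * element for element in row_pascal]
--         inverse_row_pascal.insert(0,0)
--
--         row_pascal.append(0)
--
--         for i in range(len(row_pascal)):
--             inv_triangle.append(row_pascal[i] + inverse_row_pascal[i])
--
--         return inv_triangle
--
--     else:
--         return [1]
-- ===== SOURCE B (Python) =====
-- def first_derivate(n):
--     if n <= 0:
--         return [1]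
--     row = [1]
--     c = 1
--     for k in range(1, n):
--         c = c * (n - k) // k
--         row.append(c)
--     return [a - b for a, b in zip(row + [0], [0] + row)]
-- ===== Notes on version B (the rewrite author's own statement) =====
-- stated objective: faster
-- what changed: B computes only the needed Pascal row via the multiplicative binomial recurrence c = c*(n-k)//k instead of building every row of the triangle by repeated addition, and forms the differences in one zip pass.
import Mathlib
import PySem

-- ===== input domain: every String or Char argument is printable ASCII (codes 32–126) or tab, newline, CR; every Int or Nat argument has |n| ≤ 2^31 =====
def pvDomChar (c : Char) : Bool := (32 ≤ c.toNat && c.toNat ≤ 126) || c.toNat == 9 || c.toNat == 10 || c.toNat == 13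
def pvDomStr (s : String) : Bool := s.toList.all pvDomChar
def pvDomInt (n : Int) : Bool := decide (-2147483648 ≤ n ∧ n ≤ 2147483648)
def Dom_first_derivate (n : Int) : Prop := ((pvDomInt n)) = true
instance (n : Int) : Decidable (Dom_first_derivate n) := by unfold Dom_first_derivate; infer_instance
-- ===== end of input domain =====

-- B replaces A's full Pascal-triangle construction (every row up to level n) by the
-- multiplicative binomial recurrence for the single needed row, then one zip of differences.


-- ===== PORT A =====
-- body of A's outer loop: build row i of the triangle accumulated so far.
-- (Python's `[None for …]` placeholder row is ported with 0 placeholders: every slot is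
--  overwritten before it is ever read, so the placeholder value is never observed)
def pvRowA (triangle : List (List Int)) (i : Int) : List Int :=
  let row : List Int := (PySem.List.pyRange 0 (i+1) 1).map (fun _ => 0)
  let row := PySem.List.pySetD row 0 1                      -- row[0] = 1
  let row := PySem.List.pySetD row (-1) 1                   -- row[-1] = 1
  (PySem.List.pyRange 1 i 1).foldl (fun row j =>
    PySem.List.pySetD row j
      (PySem.List.pyGetD (PySem.List.pyGetD triangle (i-1) []) (j-1) 0
       + PySem.List.pyGetD (PySem.List.pyGetD triangle (i-1) []) j 0)) row

def pascal_triangle (n : Int) : List Int :=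
  if n ≤ 0 then [1]
  else
    let triangle := (PySem.List.pyRange 0 n 1).foldl (fun tr i => tr ++ [pvRowA tr i]) []
    PySem.List.pyGetD triangle (-1) []

def first_derivate (n : Int) : List Int :=
  let inv_triangle : List Int := []
  if 0 < n then
    let row_pascal := pascal_triangle n
    let inverse_row_pascal := row_pascal.map (fun e => -1 * e)
    let inverse_row_pascal := PySem.List.insert inverse_row_pascal 0 0   -- .insert(0, 0)
    let row_pascal := row_pascal ++ [0]                                  -- .append(0)
    (PySem.List.pyRange 0 (row_pascal.length) 1).foldl
      (fun acc i => acc ++ [PySem.List.pyGetD row_pascal i 0 + PySem.List.pyGetD inverse_row_pascal i 0])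
      inv_triangle
  else [1]

-- ===== PORT B =====
-- body of B's loop: multiplicative recurrence c ← c*(n-k)//k, appended to the row
def pvStepB (n : Int) (rc : List Int × Int) (k : Int) : List Int × Int :=
  let c := PySem.Int.floordiv (rc.2 * (n - k)) k
  (rc.1 ++ [c], c)

def first_derivate_alt (n : Int) : List Int :=
  if n ≤ 0 then [1]
  else
    let row := ((PySem.List.pyRange 1 n 1).foldl (pvStepB n) ([1], 1)).1
    ((row ++ [0]).zip (0 :: row)).map (fun (ab : Int × Int) => ab.1 - ab.2)

-- ===== PRECONDITION & SPEC =====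
def Spec_first_derivate (n : Int) (out : List Int) : Prop := out = first_derivate_alt n
instance (n : Int) (out : List Int) : Decidable (Spec_first_derivate n out) := by unfold Spec_first_derivate; infer_instance

-- ===== CLAIM (what is proved, stated in full; the proofs are below) =====
def Claim_equal_first_derivate : Prop := ∀ (n : Int), Dom_first_derivate n → Spec_first_derivate n (first_derivate n)

-- ===== LEMMAS AND PROOFS =====

-- the mathematical level-m Pascal row
def pvRow (m : Nat) : List Int := (List.range (m+1)).map (fun j => ((m.choose j : Nat) : Int))
lemma pvRow_length (m : Nat) : (pvRow m).length = m + 1 := by simp [pvRow]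
lemma pvRow_getD (m t : Nat) (h : t < m + 1) : (pvRow m).getD t 0 = (m.choose t : Int) := by
  simp [pvRow, List.getD_eq_getElem?_getD, h]
lemma pv_pySetD_neg_one (xs : List Int) (v : Int) (h : xs ≠ []) :
    PySem.List.pySetD xs (-1) v = xs.set (xs.length - 1) v := by
  unfold PySem.List.pySetD PySem.List.pySet? PySem.List.pyIdx?
  have hl : 0 < xs.length := List.length_pos_iff.mpr h
  rw [if_neg (by omega), if_pos (by omega : -(xs.length:Int) ≤ -1)]
  norm_num


lemma pvSetLoop (f : Int → Int) : ∀ (a : Int) (b : Int) (xs : List Int), 0 ≤ a →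
    (((PySem.List.pyRange a b 1).foldl (fun row j => PySem.List.pySetD row j (f j)) xs).length = xs.length)
    ∧ ∀ t : Nat,
      ((PySem.List.pyRange a b 1).foldl (fun row j => PySem.List.pySetD row j (f j)) xs).getD t 0
      = if a ≤ (t:Int) ∧ (t:Int) < b ∧ t < xs.length then f t else xs.getD t 0 := by
  intro a b xs ha
  by_cases hab : b ≤ a
  · rw [PySem.List.pyRange_one_eq_nil hab]
    exact ⟨rfl, fun t => by rw [List.foldl_nil, if_neg (by omega)]⟩
  · rw [not_le] at hab
    rw [PySem.List.pyRange_one_cons hab]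
    simp only [List.foldl_cons]
    have hrec := pvSetLoop f (a+1) b (PySem.List.pySetD xs a (f a)) (by omega)
    rw [PySem.List.pySetD_of_nonneg _ _ ha] at hrec
    obtain ⟨hlen, hget⟩ := hrec
    rw [PySem.List.pySetD_of_nonneg _ _ ha]
    simp only [List.length_set] at hlen
    refine ⟨hlen, fun t => ?_⟩
    rw [hget t]
    simp only [List.length_set]
    have hset : (xs.set a.toNat (f a)).getD t 0
        = if (t:Int) = a ∧ t < xs.length then f a else xs.getD t 0 := by
      by_cases hu : t < xs.length
      · by_cases hua : (t:Int) = a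
        · rw [if_pos ⟨hua, hu⟩, List.getD_eq_getElem _ _ (by simpa using hu)]
          have ht : t = a.toNat := by omega
          subst ht
          simp
        · rw [if_neg (by tauto), List.getD_eq_getElem _ _ (by simpa using hu),
            List.getD_eq_getElem _ _ hu, List.getElem_set_ne (by omega)]
      · rw [if_neg (by tauto), List.getD_eq_default _ _ (by simpa using hu),
          List.getD_eq_default _ _ (by omega)]
    rw [hset]
    by_cases h1 : a + 1 ≤ (t:Int) ∧ (t:Int) < b ∧ t < xs.length
    · rw [if_pos h1, if_pos ⟨by omega, h1.2.1, h1.2.2⟩]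
    · rw [if_neg h1]
      by_cases h2 : (t:Int) = a ∧ t < xs.length
      · rw [if_pos h2, if_pos ⟨by omega, by omega, h2.2⟩, h2.1]
      · rw [if_neg h2, if_neg (by omega)]
termination_by a b _ _ => (b - a).toNat
decreasing_by omega

lemma pvRowA_eq (i : Nat) (triangle : List (List Int))
    (hprev : 1 ≤ i → PySem.List.pyGetD triangle ((i:Int)-1) [] = pvRow (i-1)) :
    pvRowA triangle (i:Int) = pvRow i := by
  unfold pvRowA
  set row0 : List Int := (PySem.List.pyRange 0 ((i:Int)+1) 1).map (fun _ => 0) with hrow0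
  have hR : row0 = List.replicate (i+1) 0 := by
    rw [List.eq_replicate_iff]
    constructor
    · rw [hrow0, List.length_map, PySem.List.length_pyRange_one]; omega
    · intro b hb
      rw [hrow0] at hb
      simp at hb
      exact hb
  have hlen0 : row0.length = i + 1 := by rw [hR, List.length_replicate]
  set row1 := PySem.List.pySetD row0 0 1 with hrow1
  have hr1 : row1 = row0.set 0 1 := by
    rw [hrow1, PySem.List.pySetD_of_nonneg _ _ (by omega)]; rfl
  set row2 := PySem.List.pySetD row1 (-1) 1 with hrow2
  have hlen1 : row1.length = i + 1 := by rw [hr1, List.length_set, hlen0]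
  have hr2 : row2 = row1.set i 1 := by
    rw [hrow2, pv_pySetD_neg_one _ _ (by intro h; rw [h] at hlen1; simp at hlen1), hlen1]
    norm_num
  have hlen2 : row2.length = i + 1 := by rw [hr2, List.length_set, hlen1]
  have hget2 : ∀ t : Nat, row2.getD t 0 = if t = 0 ∨ t = i then 1 else 0 := by
    intro t
    rw [hr2, hr1, hR, List.getD_eq_getElem?_getD]
    simp only [List.getElem?_set, List.length_set, List.length_replicate,
      List.getElem?_replicate]
    split_ifs <;> simp_all <;> omega
  obtain ⟨hlenL, hgetL⟩ := pvSetLoop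
    (fun j => PySem.List.pyGetD (PySem.List.pyGetD triangle ((i:Int)-1) []) (j-1) 0
       + PySem.List.pyGetD (PySem.List.pyGetD triangle ((i:Int)-1) []) j 0) 1 (i:Int) row2 (by omega)
  apply List.ext_getElem (by rw [hlenL, hlen2, pvRow_length])
  intro t h1 h2
  have htI : t < i + 1 := by rw [hlenL, hlen2] at h1; omega
  rw [← List.getD_eq_getElem _ 0 h1, ← List.getD_eq_getElem _ 0 h2, hgetL t, hlen2]
  rw [pvRow_getD i t htI]
  by_cases hmid : 1 ≤ (t:Int) ∧ (t:Int) < (i:Int) ∧ t < i + 1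
  · rw [if_pos hmid]
    have hi1 : 1 ≤ i := by omega
    rw [hprev hi1]
    have ht1 : 1 ≤ t := by omega
    have hti : t < i := by omega
    have hc1 : ((t:Int) - 1) = ((t - 1 : Nat) : Int) := by omega
    rw [hc1, PySem.List.pyGetD_natCast, PySem.List.pyGetD_natCast,
      pvRow_getD (i-1) (t-1) (by omega), pvRow_getD (i-1) t (by omega)]
    have hh := Nat.choose_succ_succ (i-1) (t-1)
    simp only [Nat.succ_eq_add_one] at hh
    rw [(by omega : i - 1 + 1 = i), (by omega : t - 1 + 1 = t)] at hh
    rw [hh]; push_cast; ring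
  · rw [if_neg hmid, hget2 t]
    by_cases h0i : t = 0 ∨ t = i
    · rw [if_pos h0i]
      rcases h0i with h | h <;> subst h <;> simp
    · rw [if_neg h0i]
      exfalso; omega

lemma pvTriangle (k : Nat) :
    (PySem.List.pyRange 0 (k:Int) 1).foldl (fun tr i => tr ++ [pvRowA tr i]) []
      = (List.range k).map pvRow := by
  induction k with
  | zero => simp [PySem.List.pyRange_one_eq_nil]
  | succ k ih =>
    have hc : ((k+1 : Nat) : Int) = (k:Int) + 1 := by push_cast; ring
    rw [hc, PySem.List.pyRange_one_succ_right (by omega), List.foldl_append, ih]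
    simp only [List.foldl_cons, List.foldl_nil]
    have hprev : 1 ≤ k → PySem.List.pyGetD ((List.range k).map pvRow) ((k:Int)-1) [] = pvRow (k-1) := by
      intro hk
      rw [(by omega : ((k:Int)-1) = ((k-1 : Nat) : Int)), PySem.List.pyGetD_natCast,
        List.getD_eq_getElem _ _ (by simp; omega)]
      simp [List.getElem_map]
    rw [pvRowA_eq k _ hprev, List.range_succ, List.map_append]
    rfl

lemma pvPascal (n : Int) (hn : 1 ≤ n) : pascal_triangle n = pvRow ((n-1).toNat) := by
  unfold pascal_triangle
  rw [if_neg (by omega)]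
  have hcast : n = ((n.toNat : Nat) : Int) := by omega
  rw [hcast, pvTriangle n.toNat]
  have hsplit : List.range n.toNat = List.range (n.toNat - 1) ++ [n.toNat - 1] := by
    have : n.toNat = (n.toNat - 1) + 1 := by omega
    rw [this, List.range_succ]
    norm_num
  rw [hsplit, List.map_append, List.map_singleton, PySem.List.pyGetD_neg_one_append_singleton]
  congr 1
  omega

lemma pvB (m : Nat) : ∀ k : Nat, k ≤ m →
    (PySem.List.pyRange 1 (1 + (k:Int)) 1).foldl (pvStepB ((m:Int)+1)) ([1], 1)
      = ((List.range (k+1)).map (fun j => ((m.choose j : Nat) : Int)), (m.choose k : Int)) := by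
  intro k
  induction k with
  | zero => simp [PySem.List.pyRange_one_eq_nil]
  | succ k ih =>
    intro hk1
    have hc : (1 : Int) + ((k+1 : Nat) : Int) = (1 + (k:Int)) + 1 := by push_cast; ring
    rw [hc, PySem.List.pyRange_one_succ_right (by omega), List.foldl_append, ih (by omega)]
    simp only [List.foldl_cons, List.foldl_nil]
    unfold pvStepB
    have harg : ((m:Int) + 1 - (1 + (k:Int))) = ((m - k : Nat) : Int) := by omega
    have hdiv : PySem.Int.floordiv ((m.choose k : Int) * ((m - k : Nat) : Int)) (1 + (k:Int))
        = (m.choose (k+1) : Int) := by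
      have hmul : m.choose k * (m - k) = m.choose (k+1) * (k+1) := (Nat.choose_succ_right_eq m k).symm
      have hcast2 : (1 + (k:Int)) = ((k+1 : Nat) : Int) := by push_cast; ring
      rw [hcast2, (by push_cast; ring : ((m.choose k : Nat) : Int) * ((m - k : Nat) : Int) = (((m.choose k * (m - k) : Nat)) : Int)), hmul,
        PySem.Int.floordiv_natCast, Nat.mul_div_cancel _ (by omega)]
    rw [harg, hdiv]
    simp only [Prod.mk.injEq, and_true]
    conv_rhs => rw [List.range_succ]
    rw [List.map_append, List.map_singleton]

theorem pv_main (n : Int) : first_derivate n = first_derivate_alt n := by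
  by_cases hn : n ≤ 0
  · unfold first_derivate first_derivate_alt
    rw [if_neg (by omega), if_pos hn]
  · have h1 : 1 ≤ n := by omega
    set m := (n - 1).toNat with hm
    have hnm : n = (m : Int) + 1 := by omega
    unfold first_derivate first_derivate_alt
    rw [if_pos (by omega), if_neg hn]
    simp only []
    rw [pvPascal n h1, ← hm, PySem.List.insert_zero]
    have hrowB : ((PySem.List.pyRange 1 n 1).foldl (pvStepB n) ([1], 1)).1 = pvRow m := by
      have hB := pvB m m (le_refl m)
      rw [show (1:Int) + (m:Int) = (m:Int) + 1 by ring] at hB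
      rw [hnm, hB, pvRow]
    rw [hrowB]
    set rp : List Int := pvRow m ++ [0] with hrp
    have hlrp : rp.length = m + 2 := by simp [hrp, pvRow_length]
    rw [PySem.List.foldl_append_singleton_eq_map
      (fun i => PySem.List.pyGetD rp i 0 + PySem.List.pyGetD (0 :: (pvRow m).map (fun e => -1 * e)) i 0)]
    rw [List.nil_append]
    apply List.ext_getElem
    · simp [PySem.List.length_pyRange_one, hlrp, pvRow_length]
      omega
    · intro t ha hb
      have htm : t < m + 2 := by
        rw [List.length_map, PySem.List.length_pyRange_one, hlrp] at ha; omega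
      rw [List.getElem_map, List.getElem_map, List.getElem_zip]
      rw [PySem.List.getElem_pyRange_one, zero_add]
      have hidx : PySem.List.pyGetD rp ((t:Nat) : Int) 0 = rp[t]'(by omega) := by
        rw [PySem.List.pyGetD_natCast, List.getD_eq_getElem _ _ (by omega)]
      rw [hidx, PySem.List.pyGetD_natCast]
      have hlc : (0 :: (pvRow m).map (fun e => -1 * e)).length = m + 2 := by
        simp [pvRow_length]
      rw [List.getD_eq_getElem _ _ (by omega)]
      rcases t with _ | s
      · simp
      · have hs : s < m + 1 := by omega
        simp only [List.getElem_cons_succ, List.getElem_map]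
        ring

-- ===== VERDICT (by name: the statement is the Claim_ definition above) =====
theorem first_derivate_spec : Claim_equal_first_derivate := by
  intro n _
  unfold Spec_first_derivate
  exact pv_main n
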